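-- pv_equiv track=rewrite | github.com/youth4ever/orion | Project EULER/pb168 Number Rotations.py | develop
-- ===== SOURCE A (Python) =====
-- def develop(p,q):
--     # returns 2 lists: nonperiodic + periodic part of p/q
--     D=[]
--     R=[]
--     while p not in R:
--         D.append((10*p)//q)
--         R.append(p)
--         p=(10*p)%q
--     a=R.index(p)
--     return D[:a],D[a:]
-- ===== SOURCE B (Python) =====
-- def develop(p, q):
--     # returns 2 lists: nonperiodic + periodic part of p/q
--     # Floyd tortoise-and-hare cycle detection on f(x) = (10*x) % q: finds the
--     # preperiod mu and period lam without storing any seen remainders, then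
--     # emits the mu+lam digits in one pass and splits.
--     def f(x):
--         return (10 * x) % q
--     tort = f(p)
--     hare = f(f(p))
--     while tort != hare:
--         tort = f(tort)
--         hare = f(f(hare))
--     mu = 0
--     tort = p
--     while tort != hare:
--         tort = f(tort)
--         hare = f(hare)
--         mu += 1
--     lam = 1
--     hare = f(tort)
--     while tort != hare:
--         hare = f(hare)
--         lam += 1
--     D = []
--     x = p
--     for _ in range(mu + lam):
--         D.append((10 * x) // q)
--         x = f(x)
--     return D[:mu], D[mu:]
-- ===== Notes on version B (the rewrite author's own statement) =====
-- stated objective: faster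
-- what changed: replaces A's seen-remainder list (O(n) membership scan per digit plus a final .index scan) by Floyd's tortoise-and-hare cycle detection on x -> (10*x) % q, which finds the preperiod and period with O(1) extra state and no membership tests, then emits the digits in one pass and splits
import Mathlib
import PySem

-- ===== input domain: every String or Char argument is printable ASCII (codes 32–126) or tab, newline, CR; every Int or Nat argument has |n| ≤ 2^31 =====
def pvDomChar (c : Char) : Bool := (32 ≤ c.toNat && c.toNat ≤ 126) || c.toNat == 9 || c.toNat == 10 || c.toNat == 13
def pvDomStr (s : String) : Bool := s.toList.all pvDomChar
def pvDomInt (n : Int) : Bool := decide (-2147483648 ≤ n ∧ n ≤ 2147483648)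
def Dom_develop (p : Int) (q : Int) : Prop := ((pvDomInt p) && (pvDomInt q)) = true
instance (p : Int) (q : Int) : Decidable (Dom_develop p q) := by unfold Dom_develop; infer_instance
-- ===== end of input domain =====

-- B replaces A's seen-remainder list (a linear membership scan per digit and a final .index
-- scan) by Floyd's tortoise-and-hare cycle detection on x ↦ (10*x) % q: objective 'faster'.

-- ===== PORT A =====
-- A's while-loop; the fuel argument only makes the recursion total: for q ≠ 0 the loop
-- revisits a remainder within |q| + 1 iterations, so fuel |q| + 2 is never exhausted.
def developLoopA (q : Int) : Nat → Int → List Int → List Int → List Int × List Int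
  | 0, _, _, _ => ([], [])
  | fuel + 1, p, D, R =>
    if p ∈ R then
      let a : Int := ((PySem.List.index? R p).getD 0 : Nat)
      (PySem.List.slice D none (some a), PySem.List.slice D (some a) none)
    else
      developLoopA q fuel (PySem.Int.mod (10 * p) q)
        (D ++ [PySem.Int.floordiv (10 * p) q]) (R ++ [p])
  termination_by structural fuel _ _ _ => fuel

def develop (p : Int) (q : Int) : List Int × List Int :=
  developLoopA q (q.natAbs + 2) p [] []

-- ===== PORT B =====
-- Source B's helper f(x) = (10*x) % q
def pvFB (q : Int) (x : Int) : Int := PySem.Int.mod (10 * x) q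

-- Source B's first while-loop (advance tortoise by one f-step, hare by two, until equal);
-- the fuel only makes the recursion total and is never exhausted for q ≠ 0.
def developPhase1 (q : Int) : Nat → Int → Int → Int
  | 0, _, hare => hare
  | fuel + 1, tort, hare =>
    if tort = hare then hare
    else developPhase1 q fuel (pvFB q tort) (pvFB q (pvFB q hare))
  termination_by structural fuel _ _ => fuel

-- Source B's second while-loop (find the preperiod mu)
def developPhase2 (q : Int) : Nat → Int → Int → Int → Int × Int
  | 0, tort, _, mu => (tort, mu)
  | fuel + 1, tort, hare, mu =>
    if tort = hare then (tort, mu)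
    else developPhase2 q fuel (pvFB q tort) (pvFB q hare) (mu + 1)
  termination_by structural fuel _ _ _ => fuel

-- Source B's third while-loop (find the period lam)
def developPhase3 (q : Int) : Nat → Int → Int → Int → Int
  | 0, _, _, lam => lam
  | fuel + 1, tort, hare, lam =>
    if tort = hare then lam
    else developPhase3 q fuel tort (pvFB q hare) (lam + 1)
  termination_by structural fuel _ _ _ => fuel

-- Source B's 'for _ in range(mu + lam)' digit loop, then the two slices
def develop_alt (p : Int) (q : Int) : List Int × List Int :=
  let hare1 := developPhase1 q (q.natAbs + 2) (pvFB q p) (pvFB q (pvFB q p))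
  let tm := developPhase2 q (q.natAbs + 2) p hare1 0
  let lam := developPhase3 q (q.natAbs + 2) tm.1 (pvFB q tm.1) 1
  let Dx := (PySem.List.pyRange 0 (tm.2 + lam) 1).foldl
    (fun (s : List Int × Int) _ => (s.1 ++ [PySem.Int.floordiv (10 * s.2) q], pvFB q s.2))
    ([], p)
  (PySem.List.slice Dx.1 none (some tm.2), PySem.List.slice Dx.1 (some tm.2) none)

-- ===== PRECONDITION & SPEC =====
-- Pre_ excludes q = 0, where Python's // and % raise ZeroDivisionError (both A and B raise there).
def Pre_develop (p : Int) (q : Int) : Prop := q ≠ 0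
instance (p : Int) (q : Int) : Decidable (Pre_develop p q) := by unfold Pre_develop; infer_instance
def pvWitness_develop : Int × Int := (1, 7)

def Spec_develop (p : Int) (q : Int) (out : List Int × List Int) : Prop := out = develop_alt p q
instance (p : Int) (q : Int) (out : List Int × List Int) : Decidable (Spec_develop p q out) := by unfold Spec_develop; infer_instance

-- ===== CLAIM (what is proved, stated in full; the proofs are below) =====
def Claim_equal_develop : Prop := ∀ (p : Int) (q : Int), Dom_develop p q → Pre_develop p q → Spec_develop p q (develop p q)

-- ===== LEMMAS AND PROOFS =====

-- the remainder sequence x_k both programs iterate: x_0 = p, x_{k+1} = (10*x_k) % q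
def pvX (p q : Int) : Nat → Int
  | 0 => p
  | k + 1 => pvFB q (pvX p q k)

-- the digit emitted at step k
def pvD (p q : Int) (k : Nat) : Int := PySem.Int.floordiv (10 * pvX p q k) q

lemma pvX_succ (p q : Int) (k : Nat) : pvX p q (k + 1) = pvFB q (pvX p q k) := rfl

-- Python's % is canonical on residue classes: congruent arguments give the same value
lemma pv_fmod_congr (x y q : Int) (h : q ∣ x - y) : Int.fmod x q = Int.fmod y q := by
  obtain ⟨t, ht⟩ := h
  have hxy : x = y + q * t := by linarith
  rw [hxy, Int.add_mul_fmod_self_left]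

-- for k ≥ 1 the values x_k are canonical representatives: equal residues mean equal values
lemma pvX_eq_of_residue {p q : Int} {i j : Nat} (hi : 1 ≤ i) (hj : 1 ≤ j)
    (h : (q : Int) ∣ pvX p q i - pvX p q j) : pvX p q i = pvX p q j := by
  obtain ⟨i', rfl⟩ := Nat.exists_eq_add_of_le hi
  obtain ⟨j', rfl⟩ := Nat.exists_eq_add_of_le hj
  have h1 : pvX p q (1 + i') = Int.fmod (10 * pvX p q i') q := by
    rw [Nat.add_comm 1 i']; rfl
  have h2 : pvX p q (1 + j') = Int.fmod (10 * pvX p q j') q := by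
    rw [Nat.add_comm 1 j']; rfl
  rw [h1, h2]
  apply pv_fmod_congr
  -- q divides 10*x_i' - 10*x_j' because it divides each value minus its fmod
  have d1 : q ∣ 10 * pvX p q i' - Int.fmod (10 * pvX p q i') q := by
    have := Int.fmod_add_mul_fdiv (10 * pvX p q i') q
    exact ⟨(10 * pvX p q i').fdiv q, by linarith⟩
  have d2 : q ∣ 10 * pvX p q j' - Int.fmod (10 * pvX p q j') q := by
    have := Int.fmod_add_mul_fdiv (10 * pvX p q j') q
    exact ⟨(10 * pvX p q j').fdiv q, by linarith⟩
  have h3 : q ∣ Int.fmod (10 * pvX p q i') q - Int.fmod (10 * pvX p q j') q := by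
    rw [← h1, ← h2]; exact h
  have := dvd_sub (dvd_add d1 h3) d2
  have heq : 10 * pvX p q i' - Int.fmod (10 * pvX p q i') q +
      (Int.fmod (10 * pvX p q i') q - Int.fmod (10 * pvX p q j') q) -
      (10 * pvX p q j' - Int.fmod (10 * pvX p q j') q) = 10 * pvX p q i' - 10 * pvX p q j' := by
    ring
  rw [heq] at this
  exact this

-- pigeonhole: some remainder repeats within |q| + 1 steps
lemma pv_exists_repeat (p q : Int) (hq : q ≠ 0) :
    ∃ k, k ≤ q.natAbs + 1 ∧ ∃ j, j < k ∧ pvX p q j = pvX p q k := by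
  have hm : 0 < q.natAbs := Int.natAbs_pos.mpr hq
  haveI : NeZero q.natAbs := ⟨by omega⟩
  have hcard : Fintype.card (ZMod q.natAbs) < (Finset.Icc 1 (q.natAbs + 1)).card := by
    rw [ZMod.card, Nat.card_Icc]; omega
  obtain ⟨i, hi, j, hj, hne, heq⟩ :=
    Finset.exists_ne_map_eq_of_card_lt_of_maps_to hcard
      (f := fun k => ((pvX p q k : Int) : ZMod q.natAbs))
      (fun k _ => Finset.mem_univ _)
  simp only [Finset.mem_Icc] at hi hj
  have hdvd : ∀ {i j : Nat}, ((pvX p q i : Int) : ZMod q.natAbs) = ((pvX p q j : Int) : ZMod q.natAbs) → (q : Int) ∣ pvX p q i - pvX p q j := by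
    intro i j h
    have hmodeq : pvX p q j ≡ pvX p q i [ZMOD (q.natAbs : Nat)] :=
      ((ZMod.intCast_eq_intCast_iff _ _ _).mp h).symm
    have hd : ((q.natAbs : Int)) ∣ pvX p q i - pvX p q j := Int.ModEq.dvd hmodeq
    rwa [Int.natAbs_dvd] at hd
  rcases Nat.lt_or_ge i j with hlt | hge
  · exact ⟨j, hj.2, i, hlt, pvX_eq_of_residue hi.1 hj.1 (hdvd heq)⟩
  · have hlt : j < i := by omega
    exact ⟨i, hi.2, j, hlt, pvX_eq_of_residue hj.1 hi.1 (hdvd heq.symm)⟩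

-- ## the rho-shape facts, parameterized by the stop index s = a + L and the join index a
-- hdist: all of x_0 .. x_{s-1} are distinct; hXa: x_a = x_s.

-- periodicity from a with period L
lemma pv_period (p q : Int) (a L : Nat) (hXa : pvX p q a = pvX p q (a + L)) :
    ∀ d, pvX p q (a + d) = pvX p q (a + d + L) := by
  intro d
  induction d with
  | zero => simpa using hXa
  | succ n ih =>
    show pvX p q (a + n + 1) = pvX p q (a + n + 1 + L)
    have h2 : a + n + 1 + L = (a + n + L) + 1 := by omega
    rw [h2, pvX_succ, pvX_succ, ih]

lemma pv_period_mul (p q : Int) (a L : Nat) (hXa : pvX p q a = pvX p q (a + L)) :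
    ∀ t n, a ≤ t → pvX p q t = pvX p q (t + n * L) := by
  intro t n ht
  induction n with
  | zero => simp
  | succ m ih =>
    obtain ⟨d, rfl⟩ := Nat.exists_eq_add_of_le ht
    have := pv_period p q a L hXa (d + m * L)
    rw [ih]
    have h1 : a + d + m * L = a + (d + m * L) := by omega
    have h2 : a + d + (m + 1) * L = a + (d + m * L) + L := by ring
    rw [h1, h2, this]

-- reduce any index ≥ a into the window [a, a + L)
lemma pv_reduce (p q : Int) (a L : Nat) (hL : 1 ≤ L) (hXa : pvX p q a = pvX p q (a + L)) :
    ∀ t, a ≤ t → pvX p q t = pvX p q (a + (t - a) % L) := by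
  intro t ht
  obtain ⟨d, rfl⟩ := Nat.exists_eq_add_of_le ht
  have hd : a + d - a = d := by omega
  rw [hd]
  have := pv_period_mul p q a L hXa (a + d % L) (d / L) (by omega)
  have harr : a + d % L + d / L * L = a + d := by
    have h1 := Nat.mod_add_div d L
    have h2 : d / L * L = L * (d / L) := Nat.mul_comm _ _
    omega
  rw [harr] at this
  exact this.symm

-- the full characterization of equalities in the sequence
lemma pv_key (p q : Int) (a L : Nat) (hL : 1 ≤ L) (hXa : pvX p q a = pvX p q (a + L))
    (hdist : ∀ i j, i < j → j < a + L → pvX p q i ≠ pvX p q j) :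
    ∀ i j, i ≤ j → (pvX p q i = pvX p q j ↔ i = j ∨ (a ≤ i ∧ (j - i) % L = 0)) := by
  intro i j hij
  constructor
  · intro h
    rcases Nat.eq_or_lt_of_le hij with rfl | hlt
    · exact Or.inl rfl
    right
    by_cases hia : a ≤ i
    · refine ⟨hia, ?_⟩
      have hja : a ≤ j := le_trans hia hij
      have hi' := pv_reduce p q a L hL hXa i hia
      have hj' := pv_reduce p q a L hL hXa j hja
      have heqw : pvX p q (a + (i - a) % L) = pvX p q (a + (j - a) % L) := by
        rw [← hi', ← hj', h]
      have hmi : (i - a) % L < L := Nat.mod_lt _ (by omega)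
      have hmj : (j - a) % L < L := Nat.mod_lt _ (by omega)
      have hmodeq : (i - a) % L = (j - a) % L := by
        by_contra hne
        rcases Nat.lt_or_ge ((i - a) % L) ((j - a) % L) with hc | hc
        · exact hdist _ _ (by omega) (by omega) heqw
        · have hc' : (j - a) % L < (i - a) % L := by omega
          exact hdist _ _ (by omega) (by omega) heqw.symm
      have h1 : (i - a) ≡ (j - a) [MOD L] := hmodeq
      have hd : L ∣ (j - a) - (i - a) := (Nat.modEq_iff_dvd' (by omega)).mp h1
      have hsub : (j - a) - (i - a) = j - i := by omega
      rw [hsub] at hd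
      obtain ⟨n, hn⟩ := hd
      rw [hn]
      exact Nat.mul_mod_right L n
    · exfalso
      have hia' : i < a := by omega
      by_cases hjs : j < a + L
      · exact hdist i j hlt hjs h
      · have hja : a ≤ j := by omega
        have hj' := pv_reduce p q a L hL hXa j hja
        have hmj : (j - a) % L < L := Nat.mod_lt _ (by omega)
        have hh : pvX p q i = pvX p q (a + (j - a) % L) := by rw [h, hj']
        exact hdist i _ (by omega) (by omega) hh
  · rintro (rfl | ⟨hia, hmod⟩)
    · rfl
    · have hd : L ∣ (j - i) := Nat.dvd_of_mod_eq_zero hmod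
      obtain ⟨n, hn⟩ := hd
      have hper := pv_period_mul p q a L hXa i n hia
      have hc : L * n = n * L := Nat.mul_comm L n
      have hji : j = i + n * L := by omega
      rw [hji, ← hper]

-- index? on the mapped range list finds exactly the unique earliest match
lemma pv_index_range (v : Int) : ∀ (a : Nat) (g : Nat → Int) (n : Nat), a < n → g a = v →
    (∀ j, j < a → g j ≠ v) → PySem.List.index? ((List.range n).map g) v = some a := by
  intro a
  induction a with
  | zero =>
    intro g n hn hv _
    obtain ⟨n', rfl⟩ : ∃ n', n = n' + 1 := ⟨n - 1, by omega⟩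
    rw [List.range_succ_eq_map, List.map_cons, hv, PySem.List.index?_cons_self]
  | succ a ih =>
    intro g n hn hv hmin
    obtain ⟨n', rfl⟩ : ∃ n', n = n' + 1 := ⟨n - 1, by omega⟩
    rw [List.range_succ_eq_map, List.map_cons,
      PySem.List.index?_cons_of_ne _ (hmin 0 (by omega)), List.map_map]
    have hrec : PySem.List.index? ((List.range n').map (fun x => g (x + 1))) v = some a :=
      ih (fun x => g (x + 1)) n' (by omega) hv (fun j hj => hmin (j + 1) (by omega))
    have hfun : (g ∘ Nat.succ) = (fun x => g (x + 1)) := rfl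
    rw [hfun, hrec]
    rfl

-- ## A's loop computes the digits up to the stop index s = a + L and splits at a
lemma pv_loopA (p q : Int) (a L : Nat) (hL : 1 ≤ L) (hXa : pvX p q a = pvX p q (a + L))
    (hdist : ∀ i j, i < j → j < a + L → pvX p q i ≠ pvX p q j) :
    ∀ fuel k, k ≤ a + L → a + L + 1 ≤ fuel + k →
      developLoopA q fuel (pvX p q k) ((List.range k).map (pvD p q)) ((List.range k).map (pvX p q)) =
        (((List.range (a + L)).map (pvD p q)).take a, ((List.range (a + L)).map (pvD p q)).drop a) := by
  intro fuel
  induction fuel with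
  | zero => intro k hk hfuel; omega
  | succ f ih =>
    intro k hk hfuel
    rcases Nat.eq_or_lt_of_le hk with rfl | hks
    · -- stop: x_s is in R, at first index a
      have hmem : pvX p q (a + L) ∈ (List.range (a + L)).map (pvX p q) := by
        simp only [List.mem_map, List.mem_range]
        exact ⟨a, by omega, hXa⟩
      have hidx : PySem.List.index? ((List.range (a + L)).map (pvX p q)) (pvX p q (a + L)) = some a :=
        pv_index_range (pvX p q (a + L)) a (pvX p q) (a + L) (by omega) hXa
          (fun j hj hgj => hdist j a hj (by omega) (hgj.trans hXa.symm))
      simp only [developLoopA, if_pos hmem, hidx, Option.getD_some]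
      rw [PySem.List.slice_to_natCast, PySem.List.slice_from_natCast]
    · -- continue: x_k not yet seen
      have hnmem : pvX p q k ∉ (List.range k).map (pvX p q) := by
        simp only [List.mem_map, List.mem_range]
        rintro ⟨j, hj, hgj⟩
        exact hdist j k hj hks hgj
      simp only [developLoopA, if_neg hnmem]
      have hD : (List.range k).map (pvD p q) ++ [PySem.Int.floordiv (10 * pvX p q k) q] =
          (List.range (k + 1)).map (pvD p q) := by
        rw [List.range_succ, List.map_append]; rfl
      have hR : (List.range k).map (pvX p q) ++ [pvX p q k] = (List.range (k + 1)).map (pvX p q) := by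
        rw [List.range_succ, List.map_append]; rfl
      rw [hD, hR]
      exact ih (k + 1) (by omega) (by omega)

-- ## Floyd phase lemmas; st = least t ≥ 1 with x_t = x_{2t}
lemma pv_phase1 (p q : Int) (st : Nat) (hst1 : 1 ≤ st) (hst : pvX p q st = pvX p q (2 * st))
    (hstmin : ∀ t, 1 ≤ t → t < st → pvX p q t ≠ pvX p q (2 * t)) :
    ∀ fuel t, 1 ≤ t → t ≤ st → st + 1 ≤ fuel + t →
      developPhase1 q fuel (pvX p q t) (pvX p q (2 * t)) = pvX p q (2 * st) := by
  intro fuel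
  induction fuel with
  | zero => intro t h1 h2 h3; omega
  | succ f ih =>
    intro t h1 h2 h3
    rcases Nat.eq_or_lt_of_le h2 with rfl | hlt
    · simp [developPhase1, hst]
    · have hne : pvX p q t ≠ pvX p q (2 * t) := hstmin t h1 hlt
      simp only [developPhase1, if_neg hne]
      have e1 : pvFB q (pvX p q t) = pvX p q (t + 1) := rfl
      have e2 : pvFB q (pvFB q (pvX p q (2 * t))) = pvX p q (2 * (t + 1)) := by
        have : 2 * (t + 1) = (2 * t) + 1 + 1 := by ring
        rw [this]; rfl
      rw [e1, e2]
      exact ih (t + 1) (by omega) (by omega) (by omega)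

lemma pv_phase2 (p q : Int) (a c : Nat) (hstop : pvX p q a = pvX p q (a + c))
    (hmin : ∀ t, t < a → pvX p q t ≠ pvX p q (t + c)) :
    ∀ fuel t, t ≤ a → a + 1 ≤ fuel + t →
      developPhase2 q fuel (pvX p q t) (pvX p q (t + c)) (t : Int) = (pvX p q a, (a : Int)) := by
  intro fuel
  induction fuel with
  | zero => intro t h1 h2; omega
  | succ f ih =>
    intro t h1 h2
    rcases Nat.eq_or_lt_of_le h1 with rfl | hlt
    · simp [developPhase2, hstop]
    · have hne : pvX p q t ≠ pvX p q (t + c) := hmin t hlt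
      simp only [developPhase2, if_neg hne]
      have e1 : pvFB q (pvX p q t) = pvX p q (t + 1) := rfl
      have e2 : pvFB q (pvX p q (t + c)) = pvX p q (t + 1 + c) := by
        have : t + 1 + c = (t + c) + 1 := by omega
        rw [this]; rfl
      have e3 : (t : Int) + 1 = ((t + 1 : Nat) : Int) := by push_cast; ring
      rw [e1, e2, e3]
      exact ih (t + 1) (by omega) (by omega)

lemma pv_phase3 (p q : Int) (a L : Nat) (hL : 1 ≤ L) (hstop : pvX p q a = pvX p q (a + L))
    (hmin : ∀ l, 1 ≤ l → l < L → pvX p q a ≠ pvX p q (a + l)) :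
    ∀ fuel l, 1 ≤ l → l ≤ L → L + 1 ≤ fuel + l →
      developPhase3 q fuel (pvX p q a) (pvX p q (a + l)) (l : Int) = (L : Int) := by
  intro fuel
  induction fuel with
  | zero => intro l h1 h2 h3; omega
  | succ f ih =>
    intro l h1 h2 h3
    rcases Nat.eq_or_lt_of_le h2 with rfl | hlt
    · simp [developPhase3, hstop]
    · have hne : pvX p q a ≠ pvX p q (a + l) := hmin l h1 hlt
      simp only [developPhase3, if_neg hne]
      have e2 : pvFB q (pvX p q (a + l)) = pvX p q (a + (l + 1)) := by
        have : a + (l + 1) = (a + l) + 1 := by omega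
        rw [this]; rfl
      have e3 : (l : Int) + 1 = ((l + 1 : Nat) : Int) := by push_cast; ring
      rw [e2, e3]
      exact ih (l + 1) (by omega) (by omega) (by omega)

-- the digit fold advances the state one x-step per element, whatever the elements are
lemma pv_fold (p q : Int) :
    ∀ (lst : List Int) (k : Nat),
      lst.foldl (fun (s : List Int × Int) _ => (s.1 ++ [PySem.Int.floordiv (10 * s.2) q], pvFB q s.2))
        ((List.range k).map (pvD p q), pvX p q k) =
      ((List.range (k + lst.length)).map (pvD p q), pvX p q (k + lst.length)) := by
  intro lst
  induction lst with
  | nil => intro k; simp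
  | cons x t ih =>
    intro k
    simp only [List.foldl_cons, List.length_cons]
    have hD : (List.range k).map (pvD p q) ++ [PySem.Int.floordiv (10 * pvX p q k) q] =
        (List.range (k + 1)).map (pvD p q) := by
      rw [List.range_succ, List.map_append]; rfl
    have hx : pvFB q (pvX p q k) = pvX p q (k + 1) := rfl
    rw [hD, hx, ih (k + 1)]
    have harr : k + 1 + t.length = k + (t.length + 1) := by omega
    rw [harr]

-- main equivalence for q ≠ 0
lemma pv_main (p q : Int) (hq : q ≠ 0) : develop p q = develop_alt p q := by
  -- extract the join index a and period L of the remainder sequence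
  obtain ⟨a, L, hL, hXa, hdist, hsle⟩ :
      ∃ a L, 1 ≤ L ∧ pvX p q a = pvX p q (a + L) ∧
        (∀ i j, i < j → j < a + L → pvX p q i ≠ pvX p q j) ∧ a + L ≤ q.natAbs + 1 := by
    obtain ⟨kk, hkk, j0, hj0, hXj0⟩ := pv_exists_repeat p q hq
    have hP : ∃ k, ∃ j, j < k ∧ pvX p q j = pvX p q k := ⟨kk, j0, hj0, hXj0⟩
    obtain ⟨a, has, hXa⟩ := Nat.find_spec hP
    have hdist : ∀ i j, i < j → j < Nat.find hP → pvX p q i ≠ pvX p q j := by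
      intro i j hij hjs h
      exact Nat.find_min hP hjs ⟨i, hij, h⟩
    have hfle : Nat.find hP ≤ q.natAbs + 1 := le_trans (Nat.find_le ⟨j0, hj0, hXj0⟩) hkk
    refine ⟨a, Nat.find hP - a, by omega, ?_, ?_, by omega⟩
    · have : a + (Nat.find hP - a) = Nat.find hP := by omega
      rw [this]; exact hXa
    · have : a + (Nat.find hP - a) = Nat.find hP := by omega
      rw [this]; exact hdist
  have key := pv_key p q a L hL hXa hdist
  -- the Floyd phase-1 stop index st: least t ≥ 1 with x_t = x_2t; it is a multiple of L past a
  have hdm := Nat.div_add_mod a L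
  have hmlt : a % L < L := Nat.mod_lt a (by omega)
  have hml : L * (a / L + 1) = L * (a / L) + L := by ring
  have h2 : a < L * (a / L + 1) := by omega
  have ht0pos : 1 ≤ L * (a / L + 1) := by omega
  have ht0le : L * (a / L + 1) ≤ a + L := by omega
  have ht0mod : (2 * (L * (a / L + 1)) - L * (a / L + 1)) % L = 0 := by
    have hsub : 2 * (L * (a / L + 1)) - L * (a / L + 1) = L * (a / L + 1) := by omega
    rw [hsub]
    exact Nat.mul_mod_right L _
  have hQ : 1 ≤ L * (a / L + 1) ∧ pvX p q (L * (a / L + 1)) = pvX p q (2 * (L * (a / L + 1))) :=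
    ⟨ht0pos, (key _ _ (by omega)).mpr (Or.inr ⟨by omega, ht0mod⟩)⟩
  have hQt0 : ∃ t, 1 ≤ t ∧ pvX p q t = pvX p q (2 * t) := ⟨_, hQ⟩
  obtain ⟨st, hst1, hstEq, hstmin, hst_le⟩ :
      ∃ st, 1 ≤ st ∧ pvX p q st = pvX p q (2 * st) ∧
        (∀ t, 1 ≤ t → t < st → pvX p q t ≠ pvX p q (2 * t)) ∧ st ≤ a + L :=
    ⟨Nat.find hQt0, (Nat.find_spec hQt0).1, (Nat.find_spec hQt0).2,
      fun t h1 h2 h => Nat.find_min hQt0 h2 ⟨h1, h⟩,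
      le_trans (Nat.find_min' hQt0 hQ) ht0le⟩
  have hst_facts : a ≤ st ∧ st % L = 0 := by
    have := (key st (2 * st) (by omega)).mp hstEq
    rcases this with h | ⟨ha1, ha2⟩
    · omega
    · have hsub : 2 * st - st = st := by omega
      rw [hsub] at ha2
      exact ⟨ha1, ha2⟩
  -- phase 2 stops exactly at a (with hare offset 2 * st)
  have hcL : (2 * st) % L = 0 := by
    obtain ⟨n, hn⟩ := Nat.dvd_of_mod_eq_zero hst_facts.2
    have hdvd : L ∣ 2 * st := ⟨2 * n, by rw [hn]; ring⟩
    obtain ⟨m, hm⟩ := hdvd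
    rw [hm]
    exact Nat.mul_mod_right L m
  have hstopc : pvX p q a = pvX p q (a + 2 * st) := by
    refine (key a (a + 2 * st) (by omega)).mpr (Or.inr ⟨le_refl a, ?_⟩)
    rw [Nat.add_sub_cancel_left]
    exact hcL
  have hmin2 : ∀ t, t < a → pvX p q t ≠ pvX p q (t + 2 * st) := by
    intro t ht h
    rcases (key t (t + 2 * st) (by omega)).mp h with h1 | ⟨h1, _⟩
    · omega
    · omega
  -- phase 3 stops exactly at L
  have hmin3 : ∀ l, 1 ≤ l → l < L → pvX p q a ≠ pvX p q (a + l) := by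
    intro l h1 h2 h
    rcases (key a (a + l) (by omega)).mp h with hh | ⟨_, hh⟩
    · omega
    · rw [Nat.add_sub_cancel_left, Nat.mod_eq_of_lt h2] at hh
      omega
  -- evaluate B
  have e1 : developPhase1 q (q.natAbs + 2) (pvFB q p) (pvFB q (pvFB q p)) = pvX p q (2 * st) :=
    pv_phase1 p q st hst1 hstEq hstmin (q.natAbs + 2) 1 (le_refl 1) hst1 (by omega)
  have e2 : developPhase2 q (q.natAbs + 2) p (pvX p q (2 * st)) 0 = (pvX p q a, (a : Int)) := by
    have e2' := pv_phase2 p q a (2 * st) hstopc hmin2 (q.natAbs + 2) 0 (by omega) (by omega)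
    rw [Nat.zero_add] at e2'
    exact e2'
  have e3 : developPhase3 q (q.natAbs + 2) (pvX p q a) (pvFB q (pvX p q a)) 1 = (L : Int) :=
    pv_phase3 p q a L hL hXa hmin3 (q.natAbs + 2) 1 (le_refl 1) hL (by omega)
  have elen : ((a : Int) + (L : Int)) = ((a + L : Nat) : Int) := by push_cast; ring
  have e4 : (PySem.List.pyRange 0 ((a + L : Nat) : Int) 1).length = a + L := by
    rw [PySem.List.length_pyRange_one]
    omega
  have e5 : List.foldl
      (fun (s : List Int × Int) (_ : Int) => (s.1 ++ [PySem.Int.floordiv (10 * s.2) q], pvFB q s.2))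
      ([], p) (PySem.List.pyRange 0 ((a + L : Nat) : Int) 1) =
      ((List.range (a + L)).map (pvD p q), pvX p q (a + L)) := by
    have h := pv_fold p q (PySem.List.pyRange 0 ((a + L : Nat) : Int) 1) 0
    rw [e4, Nat.zero_add] at h
    exact h
  have eB : develop_alt p q =
      (((List.range (a + L)).map (pvD p q)).take a, ((List.range (a + L)).map (pvD p q)).drop a) := by
    unfold develop_alt
    simp only [e1, e2, e3]
    rw [elen]
    rw [e5]
    rw [PySem.List.slice_to_natCast, PySem.List.slice_from_natCast]
  -- evaluate A
  have eA : develop p q =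
      (((List.range (a + L)).map (pvD p q)).take a, ((List.range (a + L)).map (pvD p q)).drop a) := by
    unfold develop
    calc developLoopA q (q.natAbs + 2) p [] []
        = developLoopA q (q.natAbs + 2) (pvX p q 0) ((List.range 0).map (pvD p q))
            ((List.range 0).map (pvX p q)) := rfl
      _ = _ := pv_loopA p q a L hL hXa hdist (q.natAbs + 2) 0 (by omega) (by omega)
  rw [eA, eB]

-- ===== VERDICT (by name: the statement is the Claim_ definition above) =====
theorem develop_spec : Claim_equal_develop := by
  intro p q _ hq
  unfold Spec_develop
  exact pv_main p q hq
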